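-- pv_equiv track=rewrite | github.com/jiminkyung/Algorithm | Programmers/Lv2/롤케이크 자르기.py | solution
-- ===== SOURCE A (Python) =====
-- def solution(topping: list) -> int:
--     stack = set()
--     ret = 0
--     while topping:
--         if len(stack) == len(set(topping)):
--             ret += 1
--         stack.add(topping.pop(0))
--     return ret
-- ===== SOURCE B (Python) =====
-- def solution(topping: list) -> int:
--     # One backward pass records the distinct-topping count of every suffix,
--     # one forward pass grows the prefix set and compares.  O(n) vs A's O(n^2).
--     # (A empties its argument list in place; B leaves it untouched —
--     # the equivalence is about the return value.)
--     seen = set()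
--     suf = []
--     for t in reversed(topping):
--         seen.add(t)
--         suf.append(len(seen))
--     suf.reverse()
--     seen = set()
--     ret = 0
--     for t, s in zip(topping, suf):
--         if len(seen) == s:
--             ret += 1
--         seen.add(t)
--     return ret
-- ===== Notes on version B (the rewrite author's own statement) =====
-- stated objective: faster
-- what changed: Replaces the quadratic loop that rebuilds set(topping) and pops the front each iteration with a backward pass precomputing suffix distinct counts plus a single forward pass growing the prefix set.
import Mathlib
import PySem

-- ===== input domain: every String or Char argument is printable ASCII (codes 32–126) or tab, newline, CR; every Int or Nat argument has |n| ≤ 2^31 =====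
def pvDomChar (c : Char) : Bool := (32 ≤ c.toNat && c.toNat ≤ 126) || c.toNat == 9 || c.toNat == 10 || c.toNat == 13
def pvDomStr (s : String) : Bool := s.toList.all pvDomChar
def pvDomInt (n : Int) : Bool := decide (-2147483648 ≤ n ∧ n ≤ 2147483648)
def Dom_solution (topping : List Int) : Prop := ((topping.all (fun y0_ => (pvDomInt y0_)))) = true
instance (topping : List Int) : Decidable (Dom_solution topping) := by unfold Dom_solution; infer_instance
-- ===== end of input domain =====

-- B replaces A's quadratic rebuild-set(topping)-and-pop loop with an O(n) suffix-count
-- precomputation plus one forward pass; A empties its argument list in place, B does not —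
-- the equivalence proved is about the return value.

-- ===== PORT A =====
-- 'while topping: if len(stack)==len(set(topping)): ret+=1; stack.add(topping.pop(0))'
def solutionLoopA (stack : PySem.Set Int) (ret : Int) : List Int → Int
  | [] => ret
  | t :: rest =>
    let ret' := if stack.length = (PySem.Set.ofList (t :: rest)).length then ret + 1 else ret
    solutionLoopA (PySem.Set.add stack t) ret' rest

def solution (topping : List Int) : Int := solutionLoopA PySem.Set.empty 0 topping

-- ===== PORT B =====
def solution_alt (topping : List Int) : Int :=
  -- backward pass: suffix distinct counts (append, then reverse, as in Source B)
  let p := topping.reverse.foldl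
    (fun (st : PySem.Set Int × List Nat) t =>
      let s := PySem.Set.add st.1 t
      (s, st.2 ++ [s.length])) (PySem.Set.empty, [])
  let suf := p.2.reverse
  -- forward pass: grow prefix set, compare with the suffix count
  let q := (List.zip topping suf).foldl
    (fun (st : PySem.Set Int × Int) ts =>
      let ret := if st.1.length = ts.2 then st.2 + 1 else st.2
      (PySem.Set.add st.1 ts.1, ret)) (PySem.Set.empty, 0)
  q.2

-- ===== PRECONDITION & SPEC =====
def Spec_solution (topping : List Int) (out : Int) : Prop := out = solution_alt topping
instance (topping : List Int) (out : Int) : Decidable (Spec_solution topping out) := by unfold Spec_solution; infer_instance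

-- ===== CLAIM (what is proved, stated in full; the proofs are below) =====
def Claim_equal_solution : Prop := ∀ (topping : List Int), Dom_solution topping → Spec_solution topping (solution topping)

-- ===== LEMMAS AND PROOFS =====

-- the specification of B's suffix-count list: head = distinct count of the whole suffix
def sufSpec : List Int → List Nat
  | [] => []
  | t :: r => (PySem.Set.ofList (t :: r)).length :: sufSpec r

-- distinct count is invariant under reversal
theorem length_ofList_reverse (l : List Int) :
    (PySem.Set.ofList l.reverse).length = (PySem.Set.ofList l).length := by
  apply List.Perm.length_eq
  apply (List.perm_ext_iff_of_nodup (PySem.Set.nodup_ofList _) (PySem.Set.nodup_ofList _)).mpr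
  intro x
  simp [PySem.Set.mem_ofList]

-- the backward fold of B computes (set of elements, reversed sufSpec)
theorem bFold_spec (l : List Int) :
    l.reverse.foldl
      (fun (st : PySem.Set Int × List Nat) t =>
        let s := PySem.Set.add st.1 t
        (s, st.2 ++ [s.length])) (PySem.Set.empty, []) =
    (PySem.Set.ofList l.reverse, (sufSpec l).reverse) := by
  induction l with
  | nil => rfl
  | cons t r ih =>
    simp only [List.reverse_cons, List.foldl_append, ih, List.foldl_cons, List.foldl_nil]
    have hset : PySem.Set.add (PySem.Set.ofList r.reverse) t
        = PySem.Set.ofList (r.reverse ++ [t]) :=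
      (PySem.Set.ofList_append_singleton r.reverse t).symm
    have hlen : (PySem.Set.add (PySem.Set.ofList r.reverse) t).length
        = (PySem.Set.ofList (t :: r)).length := by
      rw [hset]
      have : r.reverse ++ [t] = (t :: r).reverse := by simp
      rw [this, length_ofList_reverse]
    rw [hset] at hlen
    simp only [sufSpec, List.reverse_cons, hset, hlen]

-- A's loop equals B's forward fold over the zipped sufSpec, for any state
theorem loop_eq (l : List Int) :
    ∀ (stack : PySem.Set Int) (ret : Int),
    solutionLoopA stack ret l =
      ((List.zip l (sufSpec l)).foldl
        (fun (st : PySem.Set Int × Int) ts =>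
          let ret := if st.1.length = ts.2 then st.2 + 1 else st.2
          (PySem.Set.add st.1 ts.1, ret)) (stack, ret)).2 := by
  induction l with
  | nil => intro stack ret; rfl
  | cons t r ih =>
    intro stack ret
    simp only [sufSpec, List.zip_cons_cons, List.foldl_cons, solutionLoopA, ih]

theorem solution_eq_alt (topping : List Int) :
    solution topping = solution_alt topping := by
  unfold solution solution_alt
  rw [bFold_spec]
  simp only [List.reverse_reverse]
  exact loop_eq topping PySem.Set.empty 0

-- ===== VERDICT (by name: the statement is the Claim_ definition above) =====
theorem solution_spec : Claim_equal_solution := by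
  intro topping _
  unfold Spec_solution
  exact solution_eq_alt topping
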